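-- pv_equiv track=rewrite | github.com/electronicayciencia/rfid-rw | soft_pc/em4205.py | _cmd2cmdf
-- ===== SOURCE A (Python) =====
-- def _cmd2cmdf(i):
--     """
--     Convert a 3bit number to Command bit format
--
--     Input
--         3 bit number
--     Output
--         4 bit number
--     """
--
--     p = 0  # even parity bit
--     o = 0  # output
--
--     for _ in range(3):
--         o <<= 1
--         o |= (i & 1)
--         p ^= (i & 1)
--         i >>= 1
--
--     o <<= 1  # parity
--     o |= p
--
--     return o
-- ===== SOURCE B (Python) =====
-- # Table lookup: the 8 possible outputs precomputed once; _cmd2cmdf depends only on i mod 8.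
-- _TABLE = (0, 9, 5, 12, 3, 10, 6, 15)
--
--
-- def _cmd2cmdf(i):
--     return _TABLE[i % 8]
-- ===== Notes on version B (the rewrite author's own statement) =====
-- stated objective: simpler
-- what changed: Replaced the 3-iteration bit-reverse-and-parity loop with a single lookup in a precomputed 8-entry table indexed by i % 8.
import Mathlib
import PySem

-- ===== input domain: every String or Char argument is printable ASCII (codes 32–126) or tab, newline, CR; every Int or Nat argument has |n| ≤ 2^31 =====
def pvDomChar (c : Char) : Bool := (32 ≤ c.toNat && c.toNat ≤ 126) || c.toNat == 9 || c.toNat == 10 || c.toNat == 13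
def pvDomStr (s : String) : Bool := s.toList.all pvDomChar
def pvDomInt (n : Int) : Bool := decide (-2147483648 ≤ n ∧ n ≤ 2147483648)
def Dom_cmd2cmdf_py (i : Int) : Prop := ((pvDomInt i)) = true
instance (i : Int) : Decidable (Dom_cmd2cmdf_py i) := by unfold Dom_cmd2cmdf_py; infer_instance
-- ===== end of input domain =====

-- B replaces A's 3-iteration bit-reverse-and-parity loop with one lookup in a precomputed
-- 8-entry table indexed by i % 8 (objective: simpler).


-- ===== PORT A =====
-- one iteration of  `o <<= 1; o |= (i & 1); p ^= (i & 1); i >>= 1`  on state (p, o, i)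
def cmd2cmdfStep (st : Int × Int × Int) : Int × Int × Int :=
  (PySem.Int.bxor st.1 (PySem.Int.band st.2.2 1),
   PySem.Int.bor (st.2.1 <<< 1) (PySem.Int.band st.2.2 1),
   st.2.2 >>> (1 : Nat))

def cmd2cmdf_py (i : Int) : Int :=
  let s := (List.range 3).foldl (fun st _ => cmd2cmdfStep st) (0, 0, i)
  PySem.Int.bor (s.2.1 <<< 1) s.1

-- ===== PORT B =====
def cmd2cmdfTable : List Int := [0, 9, 5, 12, 3, 10, 6, 15]

def cmd2cmdf_py_alt (i : Int) : Int :=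
  -- _TABLE[i % 8]; the index is always in [0, 8), so the default is unreachable
  PySem.List.pyGetD cmd2cmdfTable (PySem.Int.mod i 8) 0

-- ===== PRECONDITION & SPEC =====
def Spec_cmd2cmdf_py (i : Int) (out : Int) : Prop := out = cmd2cmdf_py_alt i
instance (i : Int) (out : Int) : Decidable (Spec_cmd2cmdf_py i out) := by unfold Spec_cmd2cmdf_py; infer_instance

-- ===== CLAIM (what is proved, stated in full; the proofs are below) =====
def Claim_equal_cmd2cmdf_py : Prop := ∀ (i : Int), Dom_cmd2cmdf_py i → Spec_cmd2cmdf_py i (cmd2cmdf_py i)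

-- ===== LEMMAS AND PROOFS =====
theorem band_one_emod (j : Int) : PySem.Int.band j 1 = j % 2 := by
  rw [PySem.Int.band_one, PySem.Int.mod_eq_emod_of_pos (by norm_num)]

theorem shiftRight_one_div (j : Int) : j >>> (1 : Nat) = j / 2 := by
  simp [Int.shiftRight_eq_div_pow]

-- ===== VERDICT (by name: the statement is the Claim_ definition above) =====
theorem cmd2cmdf_py_spec : Claim_equal_cmd2cmdf_py := by
  intro i _
  show cmd2cmdf_py i = cmd2cmdf_py_alt i
  unfold cmd2cmdf_py cmd2cmdf_py_alt
  simp only [List.range_succ, List.range_zero, List.nil_append, List.cons_append,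
    List.foldl_cons, List.foldl_nil, cmd2cmdfStep, shiftRight_one_div, band_one_emod]
  rw [PySem.Int.mod_eq_emod_of_pos (by norm_num)]
  have h8 : i % 8 = (i / 2 / 2) % 2 * 4 + (i / 2) % 2 * 2 + i % 2 := by omega
  rw [h8]
  rcases Int.emod_two_eq i with ha | ha <;>
    rcases Int.emod_two_eq (i / 2) with hb | hb <;>
      rcases Int.emod_two_eq (i / 2 / 2) with hc | hc <;>
        rw [ha, hb, hc] <;> decide
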